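-- pv_equiv track=rewrite | github.com/NicholasHeim/PartitionCreator | main.py | verifySYT
-- ===== SOURCE A (Python) =====
-- def verifySYT(syt):
--
--    for row in range(len(syt)):
--       for col in range(len(syt[row])):
--          try:
--             # Determine if right square value is larger
--             if syt[row][col] > syt[row][col + 1]:
--                return 0
--          # All exceptions will be an out of bounds error
--          # Ignore them to save time on checks because they are a minimal case
--          except: pass
--
--          try:
--             # Determine if down square value is larger
--             if syt[row][col] > syt[row + 1][col]:
--                return 0
--          # All exceptions will be an out of bounds error
--          # Ignore them to save time on checks because they are a minimal case
--          except: pass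
--    return 1
-- ===== SOURCE B (Python) =====
-- def verifySYT(syt):
--     # horizontal pass: each row must be non-decreasing left to right
--     for row in syt:
--         for a, b in zip(row, row[1:]):
--             if a > b:
--                 return 0
--     # vertical pass: each column must be non-decreasing top to bottom
--     for upper, lower in zip(syt, syt[1:]):
--         for a, b in zip(upper, lower):
--             if a > b:
--                 return 0
--     return 1
-- ===== Notes on version B (the rewrite author's own statement) =====
-- stated objective: simpler
-- what changed: Replaced A's single interleaved index loop with per-comparison exception-swallowed bound checks by two separate zip-based passes: a horizontal pass over each row and a vertical pass over consecutive row pairs.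
import Mathlib
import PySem

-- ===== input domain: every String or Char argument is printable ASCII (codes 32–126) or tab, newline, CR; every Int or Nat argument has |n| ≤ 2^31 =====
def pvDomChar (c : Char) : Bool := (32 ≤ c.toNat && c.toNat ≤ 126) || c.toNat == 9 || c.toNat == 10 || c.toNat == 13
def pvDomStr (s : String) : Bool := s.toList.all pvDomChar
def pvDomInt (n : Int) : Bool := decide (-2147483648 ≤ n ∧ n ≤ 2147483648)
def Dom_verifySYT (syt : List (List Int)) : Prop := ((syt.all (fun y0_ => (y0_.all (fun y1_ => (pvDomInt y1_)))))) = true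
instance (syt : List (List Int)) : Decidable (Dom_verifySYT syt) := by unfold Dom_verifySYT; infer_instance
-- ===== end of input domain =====

-- B replaces A's single interleaved index loop (with exception-swallowed bound checks) by two
-- separate zip-based passes: a horizontal pass over each row and a vertical pass over
-- consecutive row pairs (objective: simpler).

-- ===== PORT A =====
-- Interleaved double loop over indices; each of the two try/except blocks becomes a match on
-- pyGet? (none = the swallowed IndexError); 'return 0 at the first bad cell else 1' is the
-- 'any' over the same traversal order (the returned value is the constant 0).
def verifySYT (syt : List (List Int)) : Int :=
  if (PySem.List.pyRange 0 (syt.length) 1).any (fun row =>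
      (PySem.List.pyRange 0 ((PySem.List.pyGetD syt row []).length) 1).any (fun col =>
        (match PySem.List.pyGet? (PySem.List.pyGetD syt row []) col,
               PySem.List.pyGet? (PySem.List.pyGetD syt row []) (col + 1) with
         | some a, some b => decide (a > b)
         | _, _ => false)
        ||
        (match PySem.List.pyGet? (PySem.List.pyGetD syt row []) col,
               PySem.List.pyGet? syt (row + 1) with
         | some a, some lower =>
             (match PySem.List.pyGet? lower col with
              | some d => decide (a > d)
              | none => false)
         | _, _ => false)))
  then 0 else 1

-- ===== PORT B =====
-- Two passes: horizontal adjacency inside each row (zip row row[1:]), then vertical adjacency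
-- on consecutive row pairs (zip syt syt[1:]); row[1:] is List.drop 1.
def verifySYT_alt (syt : List (List Int)) : Int :=
  if syt.any (fun row => (row.zip (row.drop 1)).any (fun p => decide (p.1 > p.2)))
  then 0
  else if (syt.zip (syt.drop 1)).any (fun p =>
            ((p.1.zip p.2).any (fun q => decide (q.1 > q.2))))
  then 0
  else 1

-- ===== PRECONDITION & SPEC =====
def Spec_verifySYT (syt : List (List Int)) (out : Int) : Prop := out = verifySYT_alt syt
instance (syt : List (List Int)) (out : Int) : Decidable (Spec_verifySYT syt out) := by unfold Spec_verifySYT; infer_instance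

-- ===== CLAIM (what is proved, stated in full; the proofs are below) =====
def Claim_equal_verifySYT : Prop := ∀ (syt : List (List Int)), Dom_verifySYT syt → Spec_verifySYT syt (verifySYT syt)

-- ===== LEMMAS AND PROOFS =====

theorem verifySYT_conds (syt : List (List Int)) :
    ((PySem.List.pyRange 0 (syt.length) 1).any (fun row =>
      (PySem.List.pyRange 0 ((PySem.List.pyGetD syt row []).length) 1).any (fun col =>
        (match PySem.List.pyGet? (PySem.List.pyGetD syt row []) col,
               PySem.List.pyGet? (PySem.List.pyGetD syt row []) (col + 1) with
         | some a, some b => decide (a > b)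
         | _, _ => false)
        ||
        (match PySem.List.pyGet? (PySem.List.pyGetD syt row []) col,
               PySem.List.pyGet? syt (row + 1) with
         | some a, some lower =>
             (match PySem.List.pyGet? lower col with
              | some d => decide (a > d)
              | none => false)
         | _, _ => false))) = true)
    ↔
    ((syt.any (fun row => (row.zip (row.drop 1)).any (fun p => decide (p.1 > p.2))) = true)
     ∨ ((syt.zip (syt.drop 1)).any (fun p =>
            ((p.1.zip p.2).any (fun q => decide (q.1 > q.2)))) = true)) := by

  simp only [PySem.List.pyRange_zero_nat, List.any_map, List.any_eq_true, List.mem_range, Function.comp]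
  constructor
  · rintro ⟨r, hr, c, hc, h⟩
    rw [PySem.List.pyGetD_natCast, List.getD_eq_getElem _ _ hr] at hc
    simp only [PySem.List.pyGetD_natCast, List.getD_eq_getElem _ _ hr,
      ← Nat.cast_add_one, PySem.List.pyGet?_natCast, Bool.or_eq_true] at h
    rcases h with h | h
    · by_cases hc1 : c + 1 < syt[r].length
      · rw [List.getElem?_eq_getElem hc, List.getElem?_eq_getElem hc1] at h
        left
        refine ⟨syt[r], List.getElem_mem hr, (syt[r][c], syt[r][c+1]), ?_, by simpa using h⟩
        rw [List.mem_iff_getElem]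
        refine ⟨c, by simp; omega, ?_⟩
        simp [List.getElem_zip]
      · rw [List.getElem?_eq_getElem hc, List.getElem?_eq_none (by omega)] at h
        simp at h
    · by_cases hr1 : r + 1 < syt.length
      · rw [List.getElem?_eq_getElem hc, List.getElem?_eq_getElem hr1] at h
        have h2 : (match syt[r+1][c]? with
            | some d => decide (syt[r][c] > d)
            | none => false) = true := h
        cases hcl : syt[r+1][c]? with
        | none => rw [hcl] at h2; simp at h2
        | some d =>
          rw [List.getElem?_eq_some_iff] at hcl
          obtain ⟨hcl', hd⟩ := hcl
          rw [List.getElem?_eq_getElem hcl'] at h2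
          right
          refine ⟨(syt[r], syt[r+1]), ?_, (syt[r][c], syt[r+1][c]), ?_, by simpa using h2⟩
          · rw [List.mem_iff_getElem]
            refine ⟨r, by simp; omega, ?_⟩
            simp [List.getElem_zip]
          · rw [List.mem_iff_getElem]
            refine ⟨c, by simp; omega, ?_⟩
            simp [List.getElem_zip]
      · rw [List.getElem?_eq_getElem hc, List.getElem?_eq_none (by omega)] at h
        simp at h
  · rintro (⟨row, hrow, p, hp, hgt⟩ | ⟨pr, hpr, p, hp, hgt⟩)
    · obtain ⟨r, hr, hrow⟩ := List.mem_iff_getElem.mp hrow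
      obtain ⟨c, hc, hp⟩ := List.mem_iff_getElem.mp hp
      subst hrow
      simp only [List.length_zip, List.length_drop, lt_min_iff] at hc
      refine ⟨r, hr, c, ?_, ?_⟩
      · rw [PySem.List.pyGetD_natCast, List.getD_eq_getElem _ _ hr]; omega
      · simp only [PySem.List.pyGetD_natCast, List.getD_eq_getElem _ _ hr,
          ← Nat.cast_add_one, PySem.List.pyGet?_natCast, Bool.or_eq_true]
        left
        rw [List.getElem?_eq_getElem (by omega : c < syt[r].length),
            List.getElem?_eq_getElem (by omega : c + 1 < syt[r].length)]
        rw [← hp] at hgt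
        simp [List.getElem_zip] at hgt
        simpa using hgt
    · obtain ⟨r, hr, hpr⟩ := List.mem_iff_getElem.mp hpr
      obtain ⟨c, hc, hp⟩ := List.mem_iff_getElem.mp hp
      subst hpr
      simp only [List.length_zip, List.length_drop, lt_min_iff] at hr hc
      simp only [List.getElem_zip, List.getElem_drop] at hc hp
      refine ⟨r, by omega, c, ?_, ?_⟩
      · rw [PySem.List.pyGetD_natCast, List.getD_eq_getElem _ _ (by omega : r < syt.length)]; omega
      · simp only [PySem.List.pyGetD_natCast,
          List.getD_eq_getElem _ _ (by omega : r < syt.length),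
          ← Nat.cast_add_one, PySem.List.pyGet?_natCast, Bool.or_eq_true]
        right
        rw [List.getElem?_eq_getElem (by omega : c < syt[r].length),
            List.getElem?_eq_getElem (by omega : r + 1 < syt.length)]
        have hcl' : c < syt[r+1].length := by
          simpa [Nat.add_comm] using hc.2
        show (match syt[r+1][c]? with
            | some d => decide (syt[r][c] > d)
            | none => false) = true
        rw [List.getElem?_eq_getElem hcl']
        rw [← hp] at hgt
        simpa [Nat.add_comm] using hgt



-- ===== VERDICT (by name: the statement is the Claim_ definition above) =====
theorem verifySYT_spec : Claim_equal_verifySYT := by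
  intro syt _
  unfold Spec_verifySYT verifySYT verifySYT_alt
  rcases iff_iff_and_or_not_and_not.mp (verifySYT_conds syt) with ⟨hA, hB⟩ | ⟨hA, hB⟩
  · rw [if_pos hA]
    rcases hB with h | h
    · rw [if_pos h]
    · by_cases hH : (syt.any (fun row =>
          (row.zip (row.drop 1)).any (fun p => decide (p.1 > p.2))) = true)
      · rw [if_pos hH]
      · rw [if_neg hH, if_pos h]
  · have hH := fun h => hB (Or.inl h)
    have hV := fun h => hB (Or.inr h)
    rw [if_neg hA, if_neg hH, if_neg hV]
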